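-- pv_equiv track=rewrite | github.com/Varvara23/Python_lesson | lesson_4.py | rare
-- ===== SOURCE A (Python) =====
-- def rare(_list_w):
--     list_low = []
--     for k in _list_w:
--         list_low += k[0]
--     dict_words = {}
--     for i in list_low:
--         dict_words[i] = list_low.count(i)
--
--     list_words_unic = list(dict_words.items())
--     list_words_unic.sort(key=lambda i: i[1])
--     return (list_words_unic[0][0])
-- ===== SOURCE B (Python) =====
-- def rare(_list_w):
--     # one-pass counter over the characters of each sublist's first word,
--     # then a single linear scan for the earliest minimum-count character
--     counts = {}
--     for k in _list_w:
--         for ch in k[0]: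
--             counts[ch] = counts.get(ch, 0) + 1
--     items = list(counts.items())
--     best = items[0]
--     for it in items[1:]:
--         if it[1] < best[1]:
--             best = it
--     return best[0]
-- ===== Notes on version B (the rewrite author's own statement) =====
-- stated objective: faster
-- what changed: replaced A's quadratic list.count-per-character recount and its stable sort of the items with a single incremental counter pass plus one linear strict-< scan for the earliest minimum
import Mathlib
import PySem

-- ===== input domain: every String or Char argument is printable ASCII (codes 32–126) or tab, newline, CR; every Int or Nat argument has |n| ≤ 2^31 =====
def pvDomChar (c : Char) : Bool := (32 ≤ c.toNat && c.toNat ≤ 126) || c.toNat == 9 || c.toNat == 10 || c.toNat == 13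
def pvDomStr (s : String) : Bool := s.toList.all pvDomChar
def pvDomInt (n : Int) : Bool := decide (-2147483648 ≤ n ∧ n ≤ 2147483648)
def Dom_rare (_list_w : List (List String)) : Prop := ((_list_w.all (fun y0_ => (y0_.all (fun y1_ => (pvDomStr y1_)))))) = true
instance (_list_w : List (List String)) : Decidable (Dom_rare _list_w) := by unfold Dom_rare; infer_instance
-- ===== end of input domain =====

-- B replaces A's per-character full-list recount (quadratic) and the stable sort of the
-- items by a single incremental counter pass and one linear strict-< minimum scan.

-- ===== PORT A =====
def rare (_list_w : List (List String)) : String :=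
  let list_low : List Char :=
    _list_w.foldl (fun acc k => acc ++ ((PySem.List.pyGet? k 0).getD "").toList) []
  let dict_words : PySem.Dict Char Int :=
    list_low.foldl (fun d i => d.insert i ((list_low.count i : Nat) : Int)) PySem.Dict.empty
  let list_words_unic := PySem.List.sorted dict_words.items (fun i => i.2)
  match PySem.List.pyGet? list_words_unic 0 with
  | some p => String.ofList [p.1]
  | none => ""   -- unreachable under Pre_rare (Python raises IndexError there)

-- ===== PORT B =====
def rare_alt (_list_w : List (List String)) : String :=
  let counts : PySem.Dict Char Int :=
    _list_w.foldl
      (fun d k => (((PySem.List.pyGet? k 0).getD "").toList).foldl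
        (fun d ch => d.insert ch (d.getD ch 0 + 1)) d)
      PySem.Dict.empty
  match counts.items with
  | [] => ""     -- unreachable under Pre_rare (Python raises IndexError there)
  | it0 :: rest =>
    let best := rest.foldl (fun b it => if it.2 < b.2 then it else b) it0
    String.ofList [best.1]

-- ===== PRECONDITION & SPEC =====
-- Pre_ excludes exactly the inputs where the Python A raises IndexError: a sublist with no
-- words (k[0]), or no character at all in the first words (list_words_unic[0]).
def Pre_rare (_list_w : List (List String)) : Prop :=
  (∀ k ∈ _list_w, k ≠ []) ∧ (∃ k ∈ _list_w, k.headD "" ≠ "")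
instance (_list_w : List (List String)) : Decidable (Pre_rare _list_w) := by
  unfold Pre_rare; infer_instance
def pvWitness_rare : List (List String) := [["ab", "c"], ["bd"]]
def Spec_rare (_list_w : List (List String)) (out : String) : Prop := out = rare_alt _list_w
instance (_list_w : List (List String)) (out : String) : Decidable (Spec_rare _list_w out) := by unfold Spec_rare; infer_instance

-- ===== CLAIM (what is proved, stated in full; the proofs are below) =====
def Claim_equal_rare : Prop := ∀ (_list_w : List (List String)), Dom_rare _list_w → Pre_rare _list_w → Spec_rare _list_w (rare _list_w)

-- ===== LEMMAS AND PROOFS =====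

-- the characters contributed by one sublist (proof abbreviation only)
def pvChars (k : List String) : List Char := ((PySem.List.pyGet? k 0).getD "").toList

-- A's list_low accumulation is the flatten of the per-sublist character lists
lemma pv_foldl_append (lw : List (List String)) (acc : List Char) :
    lw.foldl (fun a k => a ++ ((PySem.List.pyGet? k 0).getD "").toList) acc
      = acc ++ (lw.map pvChars).flatten := by
  induction lw generalizing acc with
  | nil => simp
  | cons k t ih => simp [pvChars, ih, List.append_assoc]

-- B's nested loop is the loop over the flattened per-sublist character lists
lemma pv_foldl_chars {β : Type} (f : β → Char → β) (lw : List (List String)) (d : β) :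
    lw.foldl (fun d k => (((PySem.List.pyGet? k 0).getD "").toList).foldl f d) d
      = ((lw.map pvChars).flatten).foldl f d := by
  induction lw generalizing d with
  | nil => rfl
  | cons k t ih => simp [pvChars, ih, List.foldl_append]

-- A's dict loop: inserting (i, f i) for every i produces the first-occurrence keyed table
lemma pv_items_insert_fun (f : Char → Int) :
    ∀ (M : List Char) (s : PySem.Set Char) (d : PySem.Dict Char Int),
      d.items = s.map (fun k => (k, f k)) →
      (M.foldl (fun d i => d.insert i (f i)) d).items
        = (M.foldl PySem.Set.add s).map (fun k => (k, f k)) := by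
  intro M
  induction M with
  | nil => intro s d h; simpa using h
  | cons i M' ih =>
    intro s d h
    have hkeys : d.keys = s := by
      simp [PySem.Dict.keys, h, Function.comp_def]
    have hcont : d.contains i = s.contains i := by
      rw [PySem.Dict.contains_eq_decide_mem_keys, hkeys]
      simp
    simp only [List.foldl_cons]
    by_cases hmem : s.contains i = true
    · have hc : d.contains i = true := by rw [hcont]; exact hmem
      apply ih
      rw [PySem.Dict.items_insert_of_contains d (f i) hc, h]
      have hadd : PySem.Set.add s i = s := by unfold PySem.Set.add; rw [if_pos hmem]
      rw [hadd, List.map_map]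
      apply List.map_congr_left
      intro k _
      by_cases hk : k = i
      · subst hk; simp
      · simp [Function.comp, hk]
    · have hc : d.contains i = false := by rw [hcont]; simpa using hmem
      apply ih
      rw [PySem.Dict.items_insert_of_not_contains d (f i) hc, h]
      have hadd : PySem.Set.add s i = s ++ [i] := by
        unfold PySem.Set.add; rw [if_neg hmem]
      rw [hadd, List.map_append]
      simp

-- head of a stable insertion-sort state is the strict-< running minimum
lemma pv_foldl_insertBy_head {α : Type} (key : α → Int) :
    ∀ (M : List α) (b : α) (t : List α),
      ∃ t', M.foldl (fun acc x => PySem.List.insertBy (fun a c => decide (key a < key c)) x acc) (b :: t)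
            = (M.foldl (fun best y => if key y < key best then y else best) b) :: t' := by
  intro M
  induction M with
  | nil => intro b t; exact ⟨t, rfl⟩
  | cons x M' ih =>
    intro b t
    simp only [List.foldl_cons, PySem.List.insertBy]
    by_cases hx : key x < key b
    · simp only [hx, decide_true, if_true]
      exact ih x (b :: t)
    · simp only [hx, decide_false, if_false]
      exact ih b _

lemma pv_main (lw : List (List String)) (hpre : Pre_rare lw) : rare lw = rare_alt lw := by
  obtain ⟨hne, k0, hk0mem, hk0⟩ := hpre
  -- the common character list
  set L : List Char := (lw.map pvChars).flatten with hL
  -- L is nonempty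
  have hLne : L ≠ [] := by
    obtain ⟨w, t, hk⟩ := List.exists_cons_of_ne_nil (hne k0 hk0mem)
    have hw : w ≠ "" := by subst hk; simpa using hk0
    have hget : PySem.List.pyGet? (w :: t) 0 = some w := by
      simp [PySem.List.pyGet?, PySem.List.pyIdx?]
    have hchar : pvChars k0 ≠ [] := by
      subst hk
      simp only [pvChars, hget, Option.getD_some]
      intro h
      exact hw (String.toList_eq_nil_iff.mp h)
    intro h
    rcases List.exists_cons_of_ne_nil hchar with ⟨c, cs, hc⟩
    have : c ∈ L := by
      rw [hL, List.mem_flatten]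
      exact ⟨pvChars k0, List.mem_map_of_mem hk0mem, by rw [hc]; exact List.mem_cons_self⟩
    rw [h] at this; exact (List.not_mem_nil) this
  -- both dicts have the same items list
  have hAitems :
      (L.foldl (fun d i => d.insert i ((L.count i : Nat) : Int)) PySem.Dict.empty).items
        = (PySem.Set.ofList L).map (fun k => (k, ((L.count k : Nat) : Int))) := by
    exact pv_items_insert_fun _ L PySem.Set.empty PySem.Dict.empty (by rfl)
  have hBitems :
      (lw.foldl
        (fun d k => (((PySem.List.pyGet? k 0).getD "").toList).foldl
          (fun d ch => d.insert ch (d.getD ch 0 + 1)) d)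
        PySem.Dict.empty).items
        = (PySem.Set.ofList L).map (fun k => (k, ((L.count k : Nat) : Int))) := by
    rw [pv_foldl_chars, ← hL, PySem.Dict.foldl_insert_getD_add_one_eq_counter,
      PySem.Dict.items_counter]
  -- the shared items list is nonempty
  have hIne : (PySem.Set.ofList L).map (fun k => (k, ((L.count k : Nat) : Int))) ≠ [] := by
    rcases List.exists_cons_of_ne_nil hLne with ⟨c, cs, hc⟩
    have : c ∈ PySem.Set.ofList L := by
      rw [PySem.Set.mem_ofList]; rw [hc]; exact List.mem_cons_self
    intro h
    rcases List.exists_cons_of_ne_nil (List.ne_nil_of_mem this) with ⟨_, _, h'⟩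
    rw [h'] at h; simp at h
  rcases List.exists_cons_of_ne_nil hIne with ⟨it0, rest, hI⟩
  -- evaluate both sides
  unfold rare rare_alt
  simp only []
  rw [pv_foldl_append lw [], List.nil_append, ← hL, hAitems, hBitems, hI]
  rw [PySem.List.sorted_eq_foldl_insertBy]
  simp only [List.foldl_cons]
  have hins : PySem.List.insertBy (fun a c => decide (a.2 < c.2)) it0 ([] : List (Char × Int)) = [it0] := by
    simp [PySem.List.insertBy]
  rw [hins]
  obtain ⟨t', ht'⟩ := pv_foldl_insertBy_head (fun p : Char × Int => p.2) rest it0 []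
  rw [ht']
  simp [PySem.List.pyGet?, PySem.List.pyIdx?]

-- ===== VERDICT (by name: the statement is the Claim_ definition above) =====
theorem rare_spec : Claim_equal_rare := by
  intro lw _ hpre
  unfold Spec_rare
  exact pv_main lw hpre
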